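-- pv_equiv track=rewrite | github.com/dasom2334/leetcode-solution | 1886-determine-whether-matrix-can-be-obtained-by-rotation/1886-determine-whether-matrix-can-be-obtained-by-rotation.py | findRotation
-- ===== SOURCE A (Python) =====
-- from typing import List
--
-- def findRotation(mat: List[List[int]], target: List[List[int]]) -> bool:
--     rows, cols = len(mat), len(mat[0])
--     result0 = True
--     result90 = True
--     result180 = True
--     result270 = True
--     for i in range(rows):
--         for j in range(cols):
--             if mat[i][j] != target[i][j]:
--                 result0 = False
--             if mat[i][j] != target[j][cols - 1 - i]:
--                 result90 = False
--             if mat[i][j] != target[cols - 1 - i][rows - 1 - j]: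
--                 result180 = False
--             if mat[i][j] != target[rows - 1 - j][i]:
--                 result270 = False
--     return result0 or result90 or result180 or result270
-- ===== SOURCE B (Python) =====
-- def findRotation(mat, target):
--     rows, cols = len(mat), len(mat[0])
--     window = [[mat[i][j] for j in range(cols)] for i in range(rows)]
--     rot0 = [[target[i][j] for j in range(cols)] for i in range(rows)]
--     rot90 = [[target[j][cols - 1 - i] for j in range(cols)] for i in range(rows)]
--     rot180 = [[target[cols - 1 - i][rows - 1 - j] for j in range(cols)] for i in range(rows)]
--     rot270 = [[target[rows - 1 - j][i] for j in range(cols)] for i in range(rows)]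
--     return window in (rot0, rot90, rot180, rot270)
-- ===== Notes on version B (the rewrite author's own statement) =====
-- stated objective: alternative
-- what changed: A makes one nested scan maintaining four boolean flags via rotation index formulas; B instead materializes the cols-window of mat and the four rotation views of target as concrete matrices (list comprehensions) and answers by a membership test.
import Mathlib
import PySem

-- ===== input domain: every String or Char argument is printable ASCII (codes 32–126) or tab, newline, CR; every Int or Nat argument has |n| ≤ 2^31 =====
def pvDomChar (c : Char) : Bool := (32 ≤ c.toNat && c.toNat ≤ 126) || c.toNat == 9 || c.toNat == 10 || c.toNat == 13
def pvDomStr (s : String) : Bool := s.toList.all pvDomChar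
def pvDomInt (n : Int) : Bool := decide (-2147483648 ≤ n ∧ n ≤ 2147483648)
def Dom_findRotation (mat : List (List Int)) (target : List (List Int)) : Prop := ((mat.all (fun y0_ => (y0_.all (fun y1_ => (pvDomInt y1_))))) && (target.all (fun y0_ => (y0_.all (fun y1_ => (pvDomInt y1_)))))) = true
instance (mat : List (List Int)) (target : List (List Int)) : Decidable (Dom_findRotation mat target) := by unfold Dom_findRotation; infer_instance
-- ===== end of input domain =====

-- B replaces A's single-pass four-flag index arithmetic by materializing the window of mat and
-- the four rotation views of target as lists and answering by membership (alternative; same cost).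

-- ===== PORT A =====
-- m[i][j] with Python indexing (negative wrap); default never used inside Pre_
def pvGet (m : List (List Int)) (i j : Int) : Int :=
  PySem.List.pyGetD (PySem.List.pyGetD m i []) j 0

def findRotation (mat : List (List Int)) (target : List (List Int)) : Bool :=
  let rows : Int := mat.length
  let cols : Int := (PySem.List.pyGetD mat 0 []).length
  let s :=
    (PySem.List.pyRange 0 rows 1).foldl (fun s i =>
      (PySem.List.pyRange 0 cols 1).foldl (fun s j =>
        let r0 := if pvGet mat i j ≠ pvGet target i j then false else s.1
        let r90 := if pvGet mat i j ≠ pvGet target j (cols - 1 - i) then false else s.2.1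
        let r180 := if pvGet mat i j ≠ pvGet target (cols - 1 - i) (rows - 1 - j) then false else s.2.2.1
        let r270 := if pvGet mat i j ≠ pvGet target (rows - 1 - j) i then false else s.2.2.2
        (r0, r90, r180, r270)) s) (true, true, true, true)
  s.1 || s.2.1 || s.2.2.1 || s.2.2.2

-- ===== PORT B =====
def findRotation_alt (mat : List (List Int)) (target : List (List Int)) : Bool :=
  let rows : Int := mat.length
  let cols : Int := (PySem.List.pyGetD mat 0 []).length
  let window := (PySem.List.pyRange 0 rows 1).map (fun i =>
    (PySem.List.pyRange 0 cols 1).map (fun j => pvGet mat i j))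
  let rot0 := (PySem.List.pyRange 0 rows 1).map (fun i =>
    (PySem.List.pyRange 0 cols 1).map (fun j => pvGet target i j))
  let rot90 := (PySem.List.pyRange 0 rows 1).map (fun i =>
    (PySem.List.pyRange 0 cols 1).map (fun j => pvGet target j (cols - 1 - i)))
  let rot180 := (PySem.List.pyRange 0 rows 1).map (fun i =>
    (PySem.List.pyRange 0 cols 1).map (fun j => pvGet target (cols - 1 - i) (rows - 1 - j)))
  let rot270 := (PySem.List.pyRange 0 rows 1).map (fun i =>
    (PySem.List.pyRange 0 cols 1).map (fun j => pvGet target (rows - 1 - j) i))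
  -- 'window in (rot0, rot90, rot180, rot270)'
  decide (window = rot0) || decide (window = rot90) || decide (window = rot180) || decide (window = rot270)

-- ===== PRECONDITION & SPEC =====
-- Pre_ holds exactly on the inputs where A returns normally (A raises IndexError when mat is
-- empty or any of its five indexed accesses falls out of range, negative wraparound included).
def Pre_findRotation (mat : List (List Int)) (target : List (List Int)) : Prop :=
  mat ≠ [] ∧
  ∀ i < mat.length, ∀ j < (mat.headD []).length,
    j < (mat.getD i []).length ∧
    i < target.length ∧
    j < (target.getD i []).length ∧
    j < target.length ∧
    PySem.Raise.InRange (target.getD j []).length (((mat.headD []).length : Int) - 1 - (i : Int)) ∧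
    PySem.Raise.InRange target.length (((mat.headD []).length : Int) - 1 - (i : Int)) ∧
    PySem.Raise.InRange (PySem.List.pyGetD target (((mat.headD []).length : Int) - 1 - (i : Int)) []).length ((mat.length : Int) - 1 - (j : Int)) ∧
    PySem.Raise.InRange target.length ((mat.length : Int) - 1 - (j : Int)) ∧
    i < (PySem.List.pyGetD target ((mat.length : Int) - 1 - (j : Int)) []).length
instance (mat : List (List Int)) (target : List (List Int)) : Decidable (Pre_findRotation mat target) := by unfold Pre_findRotation; infer_instance

def pvWitness_findRotation : List (List Int) × List (List Int) := ([[1, 2], [3, 4]], [[3, 1], [4, 2]])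

def Spec_findRotation (mat : List (List Int)) (target : List (List Int)) (out : Bool) : Prop := out = findRotation_alt mat target
instance (mat : List (List Int)) (target : List (List Int)) (out : Bool) : Decidable (Spec_findRotation mat target out) := by unfold Spec_findRotation; infer_instance

-- ===== CLAIM (what is proved, stated in full; the proofs are below) =====
def Claim_equal_findRotation : Prop := ∀ (mat : List (List Int)) (target : List (List Int)), Dom_findRotation mat target → Pre_findRotation mat target → Spec_findRotation mat target (findRotation mat target)

-- ===== LEMMAS AND PROOFS =====

lemma bool_eq_of_iff {a b : Bool} (h : a = true ↔ b = true) : a = b := by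
  cases a <;> cases b <;> simp_all

lemma foldl4 {α : Type} (l : List α) (f1 f2 f3 f4 : α → Bool) (s : Bool × Bool × Bool × Bool) :
    l.foldl (fun s x => (s.1 && f1 x, s.2.1 && f2 x, s.2.2.1 && f3 x, s.2.2.2 && f4 x)) s
      = (s.1 && l.all f1, s.2.1 && l.all f2, s.2.2.1 && l.all f3, s.2.2.2 && l.all f4) := by
  induction l generalizing s with
  | nil => simp
  | cons x xs ih => simp [ih, Bool.and_assoc]

lemma ite_ne_false (x y : Int) (b : Bool) : (if x ≠ y then false else b) = (b && decide (x = y)) := by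
  by_cases h : x = y <;> simp [h]

-- ===== VERDICT (by name: the statement is the Claim_ definition above) =====
theorem findRotation_spec : Claim_equal_findRotation := by
  intro mat target _ _
  unfold Spec_findRotation
  simp only [findRotation, findRotation_alt, ite_ne_false, foldl4, Bool.true_and]
  apply bool_eq_of_iff
  simp only [Bool.or_eq_true, List.all_eq_true, decide_eq_true_eq, List.map_inj_left]
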